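-- pv_equiv track=rewrite | github.com/minhduc0711/kaldi-exps | vietnamese/local/build_lexicon.py | extract_accent
-- ===== SOURCE A (Python) =====
-- def extract_accent(word, accent_dict):
--     output_word = ""
--     accent = None
--     for ch in word:
--         if ch in accent_dict:
--             stripped_vowel, accent = accent_dict[ch]
--             output_word += stripped_vowel
--         else:
--             output_word += ch
--     if not accent:
--         accent = ""
--     return output_word, accent
-- ===== SOURCE B (Python) =====
-- def extract_accent(word, accent_dict):
--     output_word = "".join(accent_dict[ch][0] if ch in accent_dict else ch
--                           for ch in word)
--     accent = None
--     for ch in reversed(word):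
--         if ch in accent_dict:
--             accent = accent_dict[ch][1]
--             break
--     if not accent:
--         accent = ""
--     return output_word, accent
-- ===== Notes on version B (the rewrite author's own statement) =====
-- stated objective: alternative
-- what changed: Replaces A's single combined loop (string accumulator plus overwritten accent variable) by two independent passes: a join-of-map comprehension builds the stripped word, and a reverse scan with early break finds the last accent.
import Mathlib
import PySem

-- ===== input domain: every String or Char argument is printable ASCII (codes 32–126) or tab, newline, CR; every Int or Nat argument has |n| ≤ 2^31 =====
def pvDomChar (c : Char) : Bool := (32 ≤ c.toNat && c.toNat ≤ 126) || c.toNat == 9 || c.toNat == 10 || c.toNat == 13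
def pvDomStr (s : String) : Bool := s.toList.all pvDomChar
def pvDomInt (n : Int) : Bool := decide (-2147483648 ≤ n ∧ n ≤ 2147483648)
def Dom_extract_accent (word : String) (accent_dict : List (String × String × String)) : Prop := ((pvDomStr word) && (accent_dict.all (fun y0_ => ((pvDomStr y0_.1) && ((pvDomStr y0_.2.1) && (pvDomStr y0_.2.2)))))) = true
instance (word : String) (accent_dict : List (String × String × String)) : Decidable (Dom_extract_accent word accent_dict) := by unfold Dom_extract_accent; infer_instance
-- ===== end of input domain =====

-- Two independent passes (join-of-map for the word, reverse scan for the accent) instead of A's single combined loop; same cost.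
-- ===== PORT A =====
-- dict lookup 'accent_dict[ch]' on the association list: first triple whose key is ch
def pvLookup (accent_dict : List (String × String × String)) (k : String) : Option (String × String) :=
  match accent_dict with
  | [] => none
  | (key, sv, ac) :: rest => if key = k then some (sv, ac) else pvLookup rest k

def extract_accent (word : String) (accent_dict : List (String × String × String)) : String × String :=
  let r := word.toList.foldl (fun (s : String × Option String) ch =>
    match pvLookup accent_dict (String.mk [ch]) with
    | some (stripped_vowel, ac) => (s.1 ++ stripped_vowel, some ac)
    | none => (s.1 ++ String.mk [ch], s.2)) ("", none)
  -- 'if not accent: accent = ""' — None and "" are both falsy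
  match r.2 with
  | some a => (r.1, if a = "" then "" else a)
  | none => (r.1, "")

-- ===== PORT B =====
-- first accent found scanning the (already reversed) character list
def pvFindAccent (chars : List Char) (accent_dict : List (String × String × String)) : Option String :=
  match chars with
  | [] => none
  | ch :: rest =>
    match pvLookup accent_dict (String.mk [ch]) with
    | some (_, ac) => some ac
    | none => pvFindAccent rest accent_dict

def extract_accent_alt (word : String) (accent_dict : List (String × String × String)) : String × String :=
  let output_word := String.join (word.toList.map (fun ch =>
    match pvLookup accent_dict (String.mk [ch]) with
    | some (stripped_vowel, _) => stripped_vowel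
    | none => String.mk [ch]))
  let accent := pvFindAccent word.toList.reverse accent_dict
  match accent with
  | some a => (output_word, if a = "" then "" else a)
  | none => (output_word, "")

-- ===== PRECONDITION & SPEC =====
def Spec_extract_accent (word : String) (accent_dict : List (String × String × String)) (out : String × String) : Prop := out = extract_accent_alt word accent_dict
instance (word : String) (accent_dict : List (String × String × String)) (out : String × String) : Decidable (Spec_extract_accent word accent_dict out) := by unfold Spec_extract_accent; infer_instance

-- ===== CLAIM (what is proved, stated in full; the proofs are below) =====
def Claim_equal_extract_accent : Prop := ∀ (word : String) (accent_dict : List (String × String × String)), Dom_extract_accent word accent_dict → Spec_extract_accent word accent_dict (extract_accent word accent_dict)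

-- ===== LEMMAS AND PROOFS =====

-- ===== VERDICT (by name: the statement is the Claim_ definition above) =====
lemma pv_foldl_str (l : List String) (t : String) :
    l.foldl (fun r s => r ++ s) t = t ++ l.foldl (fun r s => r ++ s) "" := by
  induction l generalizing t with
  | nil => simp
  | cons x xs ih =>
    simp only [List.foldl_cons]
    rw [ih (t ++ x), ih ("" ++ x)]
    simp [String.append_assoc]

lemma pvFindAccent_append (l₁ l₂ : List Char) (d : List (String × String × String)) :
    pvFindAccent (l₁ ++ l₂) d =
      match pvFindAccent l₁ d with
      | some a => some a
      | none => pvFindAccent l₂ d := by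
  induction l₁ with
  | nil => simp [pvFindAccent]
  | cons ch rest ih =>
    simp only [List.cons_append, pvFindAccent]
    cases pvLookup d (String.mk [ch]) with
    | none => exact ih
    | some p => rfl

lemma pv_fold_char (l : List Char) (d : List (String × String × String)) :
    ∀ (s : String) (o : Option String),
    l.foldl (fun (s : String × Option String) ch =>
      match pvLookup d (String.mk [ch]) with
      | some (stripped_vowel, ac) => (s.1 ++ stripped_vowel, some ac)
      | none => (s.1 ++ String.mk [ch], s.2)) (s, o)
    = (s ++ String.join (l.map (fun ch =>
        match pvLookup d (String.mk [ch]) with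
        | some (stripped_vowel, _) => stripped_vowel
        | none => String.mk [ch])),
       match pvFindAccent l.reverse d with
       | some a => some a
       | none => o) := by
  induction l with
  | nil => intro s o; simp [String.join, pvFindAccent]
  | cons ch rest ih =>
    intro s o
    simp only [List.foldl_cons, List.map_cons, List.reverse_cons, String.join]
    cases h : pvLookup d (String.mk [ch]) with
    | none =>
      rw [ih]
      rw [pvFindAccent_append]
      cases pvFindAccent rest.reverse d with
      | none =>
        simp [String.join, String.append_assoc]
        refine ⟨(pv_foldl_str _ _).symm, ?_⟩
        simp [pvFindAccent, h]
      | some a =>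
        simp [String.join, String.append_assoc]
        exact (pv_foldl_str _ _).symm
    | some p =>
      obtain ⟨sv, ac⟩ := p
      rw [ih]
      rw [pvFindAccent_append]
      cases pvFindAccent rest.reverse d with
      | none =>
        simp [String.join, String.append_assoc]
        refine ⟨(pv_foldl_str _ _).symm, ?_⟩
        simp [pvFindAccent, h]
      | some a =>
        simp [String.join, String.append_assoc]
        exact (pv_foldl_str _ _).symm

theorem extract_accent_spec : Claim_equal_extract_accent := by
  intro word d _
  show extract_accent word d = extract_accent_alt word d
  unfold extract_accent extract_accent_alt
  rw [pv_fold_char]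
  cases h : pvFindAccent word.toList.reverse d <;> simp
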